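-- pv_equiv track=rewrite | github.com/PavelGalanin2001/3-semestr-YP-Python_lab-4 | src/task_6_1.py | task61
-- ===== SOURCE A (Python) =====
-- def task61(arr):
--     lst = []
--     for i in range(len(arr)):
--         for j in range(len(arr[i])):
--             lst.append(arr[i][j])
--     sum = 0
--     for i in range(len(lst)):
--         sum += lst[i]
--     return sum
-- ===== SOURCE B (Python) =====
-- def task61(arr):
--     def dcrow(row):
--         if not row:
--             return 0
--         if len(row) == 1:
--             return row[0]
--         mid = len(row) // 2
--         return dcrow(row[:mid]) + dcrow(row[mid:])
--
--     def dc(rows):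
--         if not rows:
--             return 0
--         if len(rows) == 1:
--             return dcrow(rows[0])
--         mid = len(rows) // 2
--         return dc(rows[:mid]) + dc(rows[mid:])
--
--     return dc(arr)
-- ===== Notes on version B (the rewrite author's own statement) =====
-- stated objective: alternative
-- what changed: B sums by divide and conquer: it recursively splits the row list (and each row) in half and adds the two half-sums, instead of A's flattening into an intermediate list and a single linear index-by-index accumulation; integer addition is associative so the grouping does not change the total.
import Mathlib
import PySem

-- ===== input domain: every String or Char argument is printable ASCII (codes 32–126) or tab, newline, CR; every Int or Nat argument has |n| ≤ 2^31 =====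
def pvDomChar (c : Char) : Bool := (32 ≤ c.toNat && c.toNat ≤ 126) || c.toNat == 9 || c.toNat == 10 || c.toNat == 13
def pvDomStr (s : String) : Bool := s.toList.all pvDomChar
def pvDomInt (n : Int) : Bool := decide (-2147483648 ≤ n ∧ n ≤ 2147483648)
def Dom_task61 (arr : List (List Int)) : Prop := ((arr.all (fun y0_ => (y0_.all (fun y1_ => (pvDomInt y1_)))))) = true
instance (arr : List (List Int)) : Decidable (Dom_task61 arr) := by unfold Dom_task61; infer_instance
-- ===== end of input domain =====

-- B sums by divide and conquer (halving the row list and each row) instead of A's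
-- flatten-then-linear-accumulate; same result by associativity of addition (alternative, same cost).

-- ===== PORT A =====
def task61 (arr : List (List Int)) : Int :=
  let lst := (PySem.List.pyRange 0 arr.length 1).foldl
    (fun lst i =>
      (PySem.List.pyRange 0 (PySem.List.pyGetD arr i []).length 1).foldl
        (fun lst2 j => lst2 ++ [PySem.List.pyGetD (PySem.List.pyGetD arr i []) j 0]) lst) []
  (PySem.List.pyRange 0 lst.length 1).foldl (fun s i => s + PySem.List.pyGetD lst i 0) 0

-- ===== PORT B =====
-- row[:mid] / row[mid:] with 0 ≤ mid ≤ len are exactly List.take / List.drop.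
def dcrow (row : List Int) : Int :=
  if row = [] then 0
  else if row.length = 1 then row.headD 0
  else dcrow (row.take (row.length / 2)) + dcrow (row.drop (row.length / 2))
termination_by row.length
decreasing_by
  all_goals
    have := List.length_pos_of_ne_nil (by assumption : row ≠ [])
    simp only [List.length_take, List.length_drop]
    omega

def dc (rows : List (List Int)) : Int :=
  if rows = [] then 0
  else if rows.length = 1 then dcrow (rows.headD [])
  else dc (rows.take (rows.length / 2)) + dc (rows.drop (rows.length / 2))
termination_by rows.length
decreasing_by
  all_goals
    have := List.length_pos_of_ne_nil (by assumption : rows ≠ [])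
    simp only [List.length_take, List.length_drop]
    omega

def task61_alt (arr : List (List Int)) : Int := dc arr

-- ===== PRECONDITION & SPEC =====
def Spec_task61 (arr : List (List Int)) (out : Int) : Prop := out = task61_alt arr
instance (arr : List (List Int)) (out : Int) : Decidable (Spec_task61 arr out) := by unfold Spec_task61; infer_instance

-- ===== CLAIM =====
def Claim_equal_task61 : Prop := ∀ (arr : List (List Int)), Dom_task61 arr → Spec_task61 arr (task61 arr)

-- ===== LEMMAS AND PROOFS =====
lemma task61_lst (arr : List (List Int)) :
    (PySem.List.pyRange 0 arr.length 1).foldl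
      (fun lst i =>
        (PySem.List.pyRange 0 (PySem.List.pyGetD arr i []).length 1).foldl
          (fun lst2 j => lst2 ++ [PySem.List.pyGetD (PySem.List.pyGetD arr i []) j 0]) lst) []
    = arr.flatten := by
  have h := PySem.List.foldl_pyRange_pyGetD (a := 0) (xs := arr)
    (f := fun (lst : List Int) (row : List Int) =>
      (PySem.List.pyRange 0 row.length 1).foldl
        (fun lst2 j => lst2 ++ [PySem.List.pyGetD row j 0]) lst)
    (d := []) (init := ([] : List Int)) (by norm_num)
  simp only [Int.toNat_zero, List.drop_zero, PySem.List.len] at h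
  rw [h]
  have inner : ∀ (row : List Int) (acc : List Int),
      (PySem.List.pyRange 0 row.length 1).foldl
        (fun lst2 j => lst2 ++ [PySem.List.pyGetD row j 0]) acc = acc ++ row := by
    intro row acc
    have h2 := PySem.List.foldl_pyRange_pyGetD (a := 0) (xs := row)
      (f := fun (acc2 : List Int) (x : Int) => acc2 ++ [x]) (d := (0 : Int))
      (init := acc) (by norm_num)
    simp only [Int.toNat_zero, List.drop_zero, PySem.List.len] at h2
    rw [h2, PySem.List.foldl_append_singleton_eq_self]
  calc arr.foldl (fun lst row => (PySem.List.pyRange 0 row.length 1).foldl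
          (fun lst2 j => lst2 ++ [PySem.List.pyGetD row j 0]) lst) []
      = arr.foldl (fun lst row => lst ++ row) [] := by
        apply PySem.List.foldl_congr_mem
        intro acc row _; exact inner row acc
    _ = arr.flatten := by
        rw [PySem.List.foldl_append_eq_flatten]; simp

lemma sum_loop (lst : List Int) :
    (PySem.List.pyRange 0 lst.length 1).foldl (fun s i => s + PySem.List.pyGetD lst i 0) 0
    = lst.sum := by
  have h := PySem.List.foldl_pyRange_pyGetD (a := 0) (xs := lst)
    (f := fun (s : Int) (x : Int) => s + x) (d := (0 : Int)) (init := (0 : Int)) (by norm_num)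
  simp only [Int.toNat_zero, List.drop_zero, PySem.List.len] at h
  rw [h]
  exact (List.sum_eq_foldl (l := lst)).symm

lemma dcrow_sum (row : List Int) : dcrow row = row.sum := by
  fun_induction dcrow row with
  | case1 => simp
  | case2 x h h1 =>
    rcases List.length_eq_one_iff.mp h1 with ⟨a, rfl⟩
    simp
  | case3 x h h1 ih1 ih2 =>
    rw [ih1, ih2, ← List.sum_append, List.take_append_drop]

lemma dc_sum (rows : List (List Int)) : dc rows = rows.flatten.sum := by
  fun_induction dc rows with
  | case1 => simp
  | case2 x h h1 =>
    rcases List.length_eq_one_iff.mp h1 with ⟨r, rfl⟩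
    simp [dcrow_sum]
  | case3 x h h1 ih1 ih2 =>
    rw [ih1, ih2, ← List.sum_append, ← List.flatten_append, List.take_append_drop]

-- ===== VERDICT =====
theorem task61_spec : Claim_equal_task61 := by
  intro arr _
  unfold Spec_task61 task61 task61_alt
  rw [task61_lst, sum_loop, dc_sum]
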